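-- pv_equiv track=rewrite | github.com/HabibaGhoneim/SIC-XE-Assembler-Project-Report | Systems_Project/HTME.py | T_records
-- ===== SOURCE A (Python) =====
-- def T_records(Locations, Object_Codes):
--
--     ## TODO: Map each object code to its location
--     Mapped_Object_Codes = {}
--     for i in range(0, len(Object_Codes)):
--         if i < len(Locations):
--             Mapped_Object_Codes[Locations[i]] = Object_Codes[i]
--
--
--     current_length = 0
--     T_records = []
--     current_record_codes = ""
--     start_address = ""
--
--     for location, code in Mapped_Object_Codes.items():
--
--
--         if code == ".":
--             continue  # Skip START, BASE, and END records
--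
--         if code == "X":  # Skip RESW/RESB or uninitialized memory
--             if current_record_codes:
--                 length_hex = f"{current_length:02X}"
--                 start_address = start_address[2:].zfill(6)
--                 record = f"T{start_address}^{length_hex}{current_record_codes}"
--                 T_records.append(record)
--                 current_record_codes = ""
--                 current_length = 0
--             continue
--
--         if current_length == 0:
--             start_address = location
--             start_address = start_address[2:].zfill(6)
--             current_record_codes = "^" +  code
--             current_length = len(code) // 2
--         elif current_length + len(code) // 2 <= 30:
--             current_record_codes += "^" +  code
--             current_length += len(code) // 2
--         else:
--             length_hex = f"{current_length:02X}"
--             record = f"T{start_address}^{length_hex}{current_record_codes}"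
--             T_records.append(record)
--
--             # Start new record
--             start_address = location
--             start_address = start_address[2:].zfill(6)
--             current_record_codes = "^" +  code
--             current_length = len(code) // 2
--
--     # Final record
--     if current_record_codes:
--         length_hex = f"{current_length:02X}"
--         record = f"T{start_address}^{length_hex}{current_record_codes}"
--         T_records.append(record)
--
--
--     return T_records
-- ===== SOURCE B (Python) =====
-- # Two-phase re-implementation: split the mapped codes into X-delimited runs, then greedily pack each run.
-- def _pack(items):
--     recs = []
--     open_rec = None
--     for loc, code in items:
--         b = len(code) // 2
--         if open_rec is None or open_rec[2] == 0:
--             open_rec = (loc[2:].zfill(6), "^" + code, b)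
--         elif open_rec[2] + b <= 30:
--             open_rec = (open_rec[0], open_rec[1] + "^" + code, open_rec[2] + b)
--         else:
--             recs.append(open_rec)
--             open_rec = (loc[2:].zfill(6), "^" + code, b)
--     if open_rec is not None:
--         recs.append(open_rec)
--     return recs
--
-- def T_records(Locations, Object_Codes):
--     mapped = {}
--     for loc, code in zip(Locations, Object_Codes):
--         mapped[loc] = code
--     # phase 1: runs of real codes, cut at every "X" entry; "." entries are dropped
--     runs = []
--     cur = []
--     for loc, code in mapped.items():
--         if code == ".":
--             continue
--         if code == "X":
--             runs.append(cur)
--             cur = []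
--         else:
--             cur.append((loc, code))
--     runs.append(cur)
--     # phase 2: greedy 30-byte packing per run
--     out = []
--     for items in runs:
--         for addr, codes, n in _pack(items):
--             out.append("T" + addr + "^" + ("%02X" % n) + codes)
--     return out
-- ===== Notes on version B (the rewrite author's own statement) =====
-- stated objective: alternative
-- what changed: Replaces A's single stateful loop (mutable current-record string/length/address with three inline flush sites) by a two-phase decomposition: phase 1 splits the mapped codes into X-delimited runs, phase 2 greedily packs each run into records and formats them, each record's start address normalized once.
-- intended difference: On inputs where an 'X' object code closes a text record whose start location's [2:].zfill(6) normalization is not idempotent (an address longer than 6 characters after the dropped prefix, or sign-led), A normalizes that record's start address twice and drops two real leading characters (e.g. T00BCDE^01^FF for a record starting at 0xABCDE), while B emits the once-normalized address T0ABCDE^01^FF, which is the record's intended start address. — e.g. on T_records(["0xABCDE", "L1"], ["FF", "X"]): A returns ["T00BCDE^01^FF"], B returns ["T0ABCDE^01^FF"]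
import Mathlib
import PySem

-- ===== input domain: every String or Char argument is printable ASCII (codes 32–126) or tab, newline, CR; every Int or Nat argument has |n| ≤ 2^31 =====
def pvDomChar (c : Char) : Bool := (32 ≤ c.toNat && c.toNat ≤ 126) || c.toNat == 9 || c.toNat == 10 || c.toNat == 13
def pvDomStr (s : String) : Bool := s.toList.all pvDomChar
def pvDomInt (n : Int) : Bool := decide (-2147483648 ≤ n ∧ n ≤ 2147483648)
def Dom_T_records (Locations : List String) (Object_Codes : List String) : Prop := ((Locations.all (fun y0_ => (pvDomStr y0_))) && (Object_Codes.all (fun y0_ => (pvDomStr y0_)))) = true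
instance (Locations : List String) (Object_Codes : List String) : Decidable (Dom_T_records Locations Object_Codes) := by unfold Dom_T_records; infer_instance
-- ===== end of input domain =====

-- B is an equal-cost two-phase decomposition (X-delimited runs, then greedy packing per run); A = B outside
-- D_T_records and A ≠ B everywhere inside it: there A re-normalizes an X-flushed record's start address.

-- shared exact primitives (both Pythons format records the same way)
-- pvHex2 n = Python "%02X" % n for a non-negative n (uppercase hex, zero-padded to width 2); fuel n+1 always suffices
def pvHexDig (k : Nat) : Char := (['0','1','2','3','4','5','6','7','8','9','A','B','C','D','E','F']).getD k '0'
def pvHexAux : Nat → Nat → List Char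
  | 0, _ => []
  | fuel+1, n => if n < 16 then [pvHexDig n] else pvHexAux fuel (n / 16) ++ [pvHexDig (n % 16)]
def pvHex2 (n : Nat) : List Char :=
  let h := pvHexAux (n + 1) n
  if h.length < 2 then '0' :: h else h
-- pvAddr cs = Python cs[2:].zfill(6)
def pvAddr (cs : List Char) : List Char := PySem.Chars.zfill (PySem.List.slice cs (some 2) none) 6
-- pvFmt addr n codes = Python f"T{addr}^{n:02X}{codes}"
def pvFmt (addr : List Char) (n : Nat) (codes : List Char) : String :=
  String.ofList ('T' :: addr ++ '^' :: pvHex2 n ++ codes)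

-- ===== PORT A =====
-- state: (T_records, current_record_codes, current_length, start_address); len(code)//2 is Nat division (exact: lengths are non-negative)
def pvStepA (st : List String × List Char × Nat × List Char) (p : String × String) :
    List String × List Char × Nat × List Char :=
  match st, p with
  | (out, codes, n, addr), (loc, code) =>
    if code = "." then (out, codes, n, addr)
    else if code = "X" then
      if codes ≠ [] then (out ++ [pvFmt (pvAddr addr) n codes], [], 0, pvAddr addr)
      else (out, codes, n, addr)
    else
      let b := code.toList.length / 2
      if n = 0 then (out, '^' :: code.toList, b, pvAddr loc.toList)
      else if n + b ≤ 30 then (out, codes ++ '^' :: code.toList, n + b, addr)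
      else (out ++ [pvFmt addr n codes], '^' :: code.toList, b, pvAddr loc.toList)

def T_records (Locations : List String) (Object_Codes : List String) : List String :=
  let mapped : PySem.Dict String String :=
    (PySem.List.pyRange 0 (PySem.List.len Object_Codes) 1).foldl
      (fun d i =>
        if i < PySem.List.len Locations then
          d.insert (PySem.List.pyGetD Locations i "") (PySem.List.pyGetD Object_Codes i "")
        else d)
      PySem.Dict.empty
  match mapped.items.foldl pvStepA ([], [], 0, []) with
  | (out, codes, n, addr) => if codes ≠ [] then out ++ [pvFmt addr n codes] else out

-- ===== PORT B =====
abbrev pvRec : Type := List Char × List Char × Nat   -- (addr, codes, length)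

def pvPackStep (st : List pvRec × Option pvRec) (p : String × String) : List pvRec × Option pvRec :=
  match st, p with
  | (recs, op), (loc, code) =>
    let b := code.toList.length / 2
    match op with
    | none => (recs, some (pvAddr loc.toList, '^' :: code.toList, b))
    | some (a, c, n) =>
      if n = 0 then (recs, some (pvAddr loc.toList, '^' :: code.toList, b))
      else if n + b ≤ 30 then (recs, some (a, c ++ '^' :: code.toList, n + b))
      else (recs ++ [(a, c, n)], some (pvAddr loc.toList, '^' :: code.toList, b))

def pvPack (items : List (String × String)) : List pvRec :=
  match items.foldl pvPackStep ([], none) with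
  | (recs, op) => recs ++ op.toList

def pvRunOut (run : List (String × String)) : List String :=
  (pvPack run).map (fun r => pvFmt r.1 r.2.2 r.2.1)

def pvStepR (st : List (List (String × String)) × List (String × String)) (p : String × String) :
    List (List (String × String)) × List (String × String) :=
  match st, p with
  | (runs, cur), (loc, code) =>
    if code = "." then (runs, cur)
    else if code = "X" then (runs ++ [cur], [])
    else (runs, cur ++ [(loc, code)])

def T_records_alt (Locations : List String) (Object_Codes : List String) : List String :=
  let mapped : PySem.Dict String String :=
    (Locations.zip Object_Codes).foldl (fun d p => d.insert p.1 p.2) PySem.Dict.empty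
  match mapped.items.foldl pvStepR ([], []) with
  | (runs, cur) => (runs ++ [cur]).foldl (fun out r => out ++ pvRunOut r) []

-- ===== PRECONDITION & SPEC =====
-- pvAddrOverflow loc: the [2:].zfill(6) address normalization is NOT idempotent on loc (in effect: more than
-- 6 characters after the dropped two-character prefix, a '+'/'-'-led remainder, or a filled width without two
-- leading zeros) — re-normalizing such an address loses its two leading characters.
def pvAddrOverflow (loc : String) : Bool :=
  let a := PySem.Chars.zfill (loc.toList.drop 2) 6
  decide (PySem.Chars.zfill (a.drop 2) 6 ≠ a)

-- the location→code mapping as a plain association list: first occurrence keeps the position, a later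
-- occurrence of the same location overwrites the code in place (Python dict insertion semantics)
def pvMapped (Locations : List String) (Object_Codes : List String) : List (String × String) :=
  (Locations.zip Object_Codes).foldl
    (fun acc p =>
      if acc.any (·.1 == p.1) then acc.map (fun q => if q.1 == p.1 then p else q)
      else acc ++ [p])
    []

-- pvBadX st entries: walking the mapped entries (st = open record as (start-address-overflows?, bytes)),
-- some "X" entry closes a record whose start location's normalization is not idempotent
def pvBadX : Option (Bool × Nat) → List (String × String) → Bool
  | _, [] => false
  | st, (loc, code) :: rest =>
    if code == "." then pvBadX st rest
    else if code == "X" then (st.map Prod.fst).getD false || pvBadX none rest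
    else
      let b := code.toList.length / 2
      match st with
      | some (ov, n) =>
        if n == 0 then pvBadX (some (pvAddrOverflow loc, b)) rest
        else if n + b ≤ 30 then pvBadX (some (ov, n + b)) rest
        else pvBadX (some (pvAddrOverflow loc, b)) rest
      | none => pvBadX (some (pvAddrOverflow loc, b)) rest

-- On inputs where some "X" object code closes a text record whose start location's [2:].zfill(6)
-- normalization is not idempotent (in effect, an address longer than 6 characters after the dropped prefix),
-- A normalizes that record's start address TWICE and drops two real leading characters (e.g. "T00BCDE^01^FF"
-- for a record starting at "0xABCDE"); B normalizes each record's start address once, which is the record's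
-- intended start address.
def D_T_records (Locations : List String) (Object_Codes : List String) : Prop :=
  pvBadX none (pvMapped Locations Object_Codes) = true
instance (Locations : List String) (Object_Codes : List String) : Decidable (D_T_records Locations Object_Codes) := by unfold D_T_records; infer_instance

def Spec_T_records (Locations : List String) (Object_Codes : List String) (out : List String) : Prop := ¬ D_T_records Locations Object_Codes → out = T_records_alt Locations Object_Codes
instance (Locations : List String) (Object_Codes : List String) (out : List String) : Decidable (Spec_T_records Locations Object_Codes out) := by unfold Spec_T_records; infer_instance

def pvDiffWitness_T_records : List String × List String := (["0xABCDE", "L1"], ["FF", "X"])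
def pvDiffWitnessOut_T_records : (List String) × (List String) := (["T00BCDE^01^FF"], ["T0ABCDE^01^FF"])

-- ===== CLAIM (what is proved, stated in full; the proofs are below) =====
def Claim_unchanged_T_records : Prop := ∀ (Locations : List String) (Object_Codes : List String), Dom_T_records Locations Object_Codes → Spec_T_records Locations Object_Codes (T_records Locations Object_Codes)
def Claim_changed_T_records : Prop := Dom_T_records (pvDiffWitness_T_records.1) (pvDiffWitness_T_records.2) ∧ D_T_records (pvDiffWitness_T_records.1) (pvDiffWitness_T_records.2) ∧ T_records (pvDiffWitness_T_records.1) (pvDiffWitness_T_records.2) = pvDiffWitnessOut_T_records.1 ∧ T_records_alt (pvDiffWitness_T_records.1) (pvDiffWitness_T_records.2) = pvDiffWitnessOut_T_records.2 ∧ pvDiffWitnessOut_T_records.1 ≠ pvDiffWitnessOut_T_records.2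
def Claim_exact_T_records : Prop := ∀ (Locations : List String) (Object_Codes : List String), Dom_T_records Locations Object_Codes → D_T_records Locations Object_Codes → T_records Locations Object_Codes ≠ T_records_alt Locations Object_Codes

-- ===== LEMMAS AND PROOFS =====

-- A's reference semantics: process remaining items with an optional open record; an X-flush re-normalizes the address
def pvAcont : Option pvRec → List (String × String) → List String
  | none, [] => []
  | some (a, c, n), [] => [pvFmt a n c]
  | op, (loc, code) :: rest =>
    if code = "." then pvAcont op rest
    else if code = "X" then
      match op with
      | none => pvAcont none rest
      | some (a, c, n) => pvFmt (pvAddr a) n c :: pvAcont none rest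
    else
      let b := code.toList.length / 2
      match op with
      | none => pvAcont (some (pvAddr loc.toList, '^' :: code.toList, b)) rest
      | some (a, c, n) =>
        if n = 0 then pvAcont (some (pvAddr loc.toList, '^' :: code.toList, b)) rest
        else if n + b ≤ 30 then pvAcont (some (a, c ++ '^' :: code.toList, n + b)) rest
        else pvFmt a n c :: pvAcont (some (pvAddr loc.toList, '^' :: code.toList, b)) rest

-- B's reference semantics: identical except that an X-flush emits the stored (already normalized) address as is
def pvBcont : Option pvRec → List (String × String) → List String
  | none, [] => []
  | some (a, c, n), [] => [pvFmt a n c]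
  | op, (loc, code) :: rest =>
    if code = "." then pvBcont op rest
    else if code = "X" then
      match op with
      | none => pvBcont none rest
      | some (a, c, n) => pvFmt a n c :: pvBcont none rest
    else
      let b := code.toList.length / 2
      match op with
      | none => pvBcont (some (pvAddr loc.toList, '^' :: code.toList, b)) rest
      | some (a, c, n) =>
        if n = 0 then pvBcont (some (pvAddr loc.toList, '^' :: code.toList, b)) rest
        else if n + b ≤ 30 then pvBcont (some (a, c ++ '^' :: code.toList, n + b)) rest
        else pvFmt a n c :: pvBcont (some (pvAddr loc.toList, '^' :: code.toList, b)) rest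

def pvStA : Option pvRec → List Char → List Char × Nat × List Char
  | none, a => ([], 0, a)
  | some (ad, c, n), _ => (c, n, ad)

-- A's loop + final flush equals A's reference semantics
theorem pvA_eq_Acont (items : List (String × String)) :
    ∀ (out : List String) (op : Option pvRec) (a : List Char),
    (∀ ad c n, op = some (ad, c, n) → c ≠ []) →
    (if (items.foldl pvStepA (out, pvStA op a)).2.1 ≠ [] then
       (items.foldl pvStepA (out, pvStA op a)).1
         ++ [pvFmt (items.foldl pvStepA (out, pvStA op a)).2.2.2
               (items.foldl pvStepA (out, pvStA op a)).2.2.1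
               (items.foldl pvStepA (out, pvStA op a)).2.1]
     else (items.foldl pvStepA (out, pvStA op a)).1)
    = out ++ pvAcont op items := by
  induction items with
  | nil =>
    intro out op a hwf
    cases op with
    | none => simp [pvStA, pvAcont]
    | some r =>
      obtain ⟨ad, c, n⟩ := r
      simp [pvStA, pvAcont, hwf ad c n rfl]
  | cons p rest ih =>
    obtain ⟨loc, code⟩ := p
    intro out op a hwf
    rw [List.foldl_cons]
    by_cases hdot : code = "."
    · cases op with
      | none =>
        simpa [pvStepA, pvStA, pvAcont, hdot] using ih out none a (by simp)
      | some r =>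
        obtain ⟨ad, c, n⟩ := r
        simpa [pvStepA, pvStA, pvAcont, hdot, hwf ad c n rfl] using ih out (some (ad, c, n)) a hwf
    · by_cases hX : code = "X"
      · cases op with
        | none =>
          simpa [pvStepA, pvStA, pvAcont, hdot, hX] using ih out none a (by simp)
        | some r =>
          obtain ⟨ad, c, n⟩ := r
          have hc := hwf ad c n rfl
          simpa [pvStepA, pvStA, pvAcont, hdot, hX, hc] using
            ih (out ++ [pvFmt (pvAddr ad) n c]) none (pvAddr ad) (by simp)
      · cases op with
        | none =>
          simpa [pvStepA, pvStA, pvAcont, hdot, hX] using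
            ih out (some (pvAddr loc.toList, '^' :: code.toList, code.toList.length / 2)) []
              (by intro ad' c' n' h; cases h; simp)
        | some r =>
          obtain ⟨ad, c, n⟩ := r
          by_cases hn : n = 0
          · simpa [pvStepA, pvStA, pvAcont, hdot, hX, hn] using
              ih out (some (pvAddr loc.toList, '^' :: code.toList, code.toList.length / 2)) []
                (by intro ad' c' n' h; cases h; simp)
          · by_cases h30 : n + code.length / 2 ≤ 30
            · simpa [pvStepA, pvStA, pvAcont, hdot, hX, hn, h30] using
                ih out (some (ad, c ++ '^' :: code.toList, n + code.toList.length / 2)) []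
                  (by intro ad' c' n' h; cases h; simp)
            · simpa [pvStepA, pvStA, pvAcont, hdot, hX, hn, h30] using
                ih (out ++ [pvFmt ad n c])
                  (some (pvAddr loc.toList, '^' :: code.toList, code.toList.length / 2)) []
                  (by intro ad' c' n' h; cases h; simp)

-- B's two-phase pipeline equals B's reference semantics
theorem pvB_eq_Bcont (items : List (String × String)) :
    ∀ (racc : List (List (String × String))) (cur : List (String × String))
      (recs : List pvRec) (op : Option pvRec),
    cur.foldl pvPackStep ([], none) = (recs, op) →
    (op = none → recs = []) →
    ((items.foldl pvStepR (racc, cur)).1 ++ [(items.foldl pvStepR (racc, cur)).2]).foldl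
        (fun out r => out ++ pvRunOut r) []
    = racc.foldl (fun out r => out ++ pvRunOut r) []
      ++ recs.map (fun r => pvFmt r.1 r.2.2 r.2.1) ++ pvBcont op items := by
  induction items with
  | nil =>
    intro racc cur recs op hp hwf
    rw [List.foldl_nil]
    rw [PySem.List.foldl_append_eq_flatMap, PySem.List.foldl_append_eq_flatMap]
    cases op with
    | none =>
      simp [hwf rfl, pvRunOut, pvPack, hp, pvBcont]
    | some r =>
      obtain ⟨a, c, n⟩ := r
      simp [pvRunOut, pvPack, hp, pvBcont]
  | cons p rest ih =>
    obtain ⟨loc, code⟩ := p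
    intro racc cur recs op hp hwf
    rw [List.foldl_cons]
    by_cases hdot : code = "."
    · cases op with
      | none => simpa [pvStepR, hdot, pvBcont] using ih racc cur recs none hp hwf
      | some r =>
        obtain ⟨a, c, n⟩ := r
        simpa [pvStepR, hdot, pvBcont] using ih racc cur recs (some (a, c, n)) hp hwf
    · by_cases hX : code = "X"
      · have h2 := ih (racc ++ [cur]) [] [] none rfl (fun _ => rfl)
        have hrun : pvRunOut cur
            = recs.map (fun r => pvFmt r.1 r.2.2 r.2.1)
              ++ (match op with
                  | none => []
                  | some (a, c, n) => [pvFmt a n c]) := by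
          cases op with
          | none => simp [hwf rfl, pvRunOut, pvPack, hp]
          | some r =>
            obtain ⟨a, c, n⟩ := r
            simp [pvRunOut, pvPack, hp]
        have hstep : pvStepR (racc, cur) (loc, code) = (racc ++ [cur], []) := by
          simp [pvStepR, hX]
        rw [hstep, h2]
        simp only [PySem.List.foldl_append_eq_flatMap]
        cases op with
        | none => simp [hrun, hwf rfl, pvBcont, hX]
        | some r =>
          obtain ⟨a, c, n⟩ := r
          simp [hrun, pvBcont, hX]
      · have hp' : (cur ++ [(loc, code)]).foldl pvPackStep ([], none)
            = pvPackStep (recs, op) (loc, code) := by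
          rw [List.foldl_append, hp]; rfl
        cases op with
        | none =>
          have := ih racc (cur ++ [(loc, code)]) recs
              (some (pvAddr loc.toList, '^' :: code.toList, code.toList.length / 2))
              (by rw [hp']; rfl) (by simp)
          simpa [pvStepR, hdot, hX, pvBcont] using this
        | some r =>
          obtain ⟨a, c, n⟩ := r
          by_cases hn : n = 0
          · have := ih racc (cur ++ [(loc, code)]) recs
                (some (pvAddr loc.toList, '^' :: code.toList, code.toList.length / 2))
                (by rw [hp']; simp [pvPackStep, hn]) (by simp)
            simpa [pvStepR, hdot, hX, pvBcont, hn] using this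
          · by_cases h30 : n + code.length / 2 ≤ 30
            · have := ih racc (cur ++ [(loc, code)]) recs
                  (some (a, c ++ '^' :: code.toList, n + code.toList.length / 2))
                  (by rw [hp']; simp [pvPackStep, hn, h30]) (by simp)
              simpa [pvStepR, hdot, hX, pvBcont, hn, h30] using this
            · have := ih racc (cur ++ [(loc, code)]) (recs ++ [(a, c, n)])
                  (some (pvAddr loc.toList, '^' :: code.toList, code.toList.length / 2))
                  (by rw [hp']; simp [pvPackStep, hn, h30]) (by simp)
              simpa [pvStepR, hdot, hX, pvBcont, hn, h30] using this

-- the two dict builds insert the same key/value sequence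
theorem pvDict_eq (L OC : List String) :
    ∀ (k : Nat) (d : PySem.Dict String String),
    (PySem.List.pyRange (k : Int) ((OC.length : Nat) : Int) 1).foldl
      (fun d i =>
        if i < ((L.length : Nat) : Int) then
          d.insert (PySem.List.pyGetD L i "") (PySem.List.pyGetD OC i "")
        else d) d
    = ((L.drop k).zip (OC.drop k)).foldl (fun d p => d.insert p.1 p.2) d := by
  intro k d
  by_cases hk : k < OC.length
  · rw [PySem.List.pyRange_one_cons (by exact_mod_cast hk), List.foldl_cons]
    by_cases hL : k < L.length
    · rw [List.drop_eq_getElem_cons hL, List.drop_eq_getElem_cons hk]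
      rw [List.zip_cons_cons, List.foldl_cons]
      have h1 : ((k : Int) < ((L.length : Nat) : Int)) := by exact_mod_cast hL
      rw [if_pos h1]
      rw [PySem.List.pyGetD_natCast, PySem.List.pyGetD_natCast]
      rw [List.getD_eq_getElem _ _ hL, List.getD_eq_getElem _ _ hk]
      have : ((k : Int) + 1) = (((k + 1 : Nat) : Nat) : Int) := by push_cast; ring
      rw [this]
      exact pvDict_eq L OC (k + 1) _
    · have hL' : L.length ≤ k := Nat.le_of_not_lt hL
      rw [if_neg (by exact_mod_cast Nat.not_lt.mpr hL')]
      have : ((k : Int) + 1) = (((k + 1 : Nat) : Nat) : Int) := by push_cast; ring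
      rw [this, pvDict_eq L OC (k + 1) d]
      rw [List.drop_eq_nil_of_le hL', List.drop_eq_nil_of_le (Nat.le_succ_of_le hL')]
      simp
  · rw [PySem.List.pyRange_one_eq_nil (by exact_mod_cast Nat.le_of_not_lt hk)]
    rw [List.drop_eq_nil_of_le (Nat.le_of_not_lt hk)]
    simp
termination_by k => OC.length - k
decreasing_by all_goals omega

theorem pvAddr_idem_iff (l : String) :
    (pvAddr (pvAddr l.toList) = pvAddr l.toList) ↔ pvAddrOverflow l = false := by
  have hs : ∀ cs : List Char, PySem.List.slice cs (some 2) none = cs.drop 2 := by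
    intro cs
    simpa using PySem.List.slice_from (a := 2) cs (by norm_num)
  unfold pvAddr pvAddrOverflow
  rw [hs, hs]
  simp

-- pvMapped computes exactly the items list of the dict both ports build
theorem pvMapped_eq_items (L OC : List String) :
    pvMapped L OC = ((L.zip OC).foldl (fun d p => d.insert p.1 p.2) PySem.Dict.empty).items := by
  unfold pvMapped
  suffices h : ∀ (pairs : List (String × String)) (d : PySem.Dict String String),
      pairs.foldl
        (fun acc p =>
          if acc.any (·.1 == p.1) then acc.map (fun q => if q.1 == p.1 then p else q)
          else acc ++ [p]) d.items
      = (pairs.foldl (fun d p => d.insert p.1 p.2) d).items by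
    simpa using h (L.zip OC) PySem.Dict.empty
  intro pairs
  induction pairs with
  | nil => intro d; rfl
  | cons p rest ih =>
    intro d
    rw [List.foldl_cons, List.foldl_cons, ← ih (d.insert p.1 p.2)]
    congr 1
    simp only [PySem.Dict.insert, PySem.Dict.contains]
    split_ifs <;> rfl

-- pvFmt is injective in the address (same byte count and codes)
theorem pvFmt_inj (a1 a2 : List Char) (n : Nat) (c : List Char) :
    pvFmt a1 n c = pvFmt a2 n c ↔ a1 = a2 := by
  unfold pvFmt
  constructor
  · intro he
    have h1 := congrArg String.toList he
    simp only [String.toList_ofList] at h1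
    injection h1 with h1a h1b
    simp only [List.append_eq, List.append_assoc] at h1b
    exact (List.append_left_inj _).1 h1b
  · intro he; rw [he]

-- relation between the badness walk's state and the reference loops' open record
def pvRel : Option (Bool × Nat) → Option pvRec → Prop
  | none, none => True
  | some (ov, n), some (a, _c, n') => n = n' ∧ (ov = false ↔ pvAddr a = a)
  | _, _ => False

-- the two reference loops agree exactly when the badness walk reports no bad X-flush
theorem pvAcont_eq_iff_not_bad (items : List (String × String)) :
    ∀ (st : Option (Bool × Nat)) (op : Option pvRec), pvRel st op →
    (pvAcont op items = pvBcont op items ↔ pvBadX st items = false) := by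
  induction items with
  | nil =>
    intro st op _
    cases op with
    | none => cases st <;> simp [pvAcont, pvBcont, pvBadX]
    | some r => obtain ⟨a, c, n⟩ := r; cases st <;> simp [pvAcont, pvBcont, pvBadX]
  | cons p rest ih =>
    obtain ⟨loc, code⟩ := p
    intro st op hrel
    by_cases hdot : code = "."
    · cases st with
      | none =>
        cases op with
        | none => simpa [pvAcont, pvBcont, pvBadX, hdot] using ih none none trivial
        | some r => exact absurd hrel (by obtain ⟨a, c, n⟩ := r; simp [pvRel])
      | some sv =>
        obtain ⟨ov, n⟩ := sv
        cases op with
        | none => exact absurd hrel (by simp [pvRel])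
        | some r =>
          obtain ⟨a, c, n'⟩ := r
          simpa [pvAcont, pvBcont, pvBadX, hdot] using ih (some (ov, n)) (some (a, c, n')) hrel
    · by_cases hX : code = "X"
      · cases st with
        | none =>
          cases op with
          | none => simpa [pvAcont, pvBcont, pvBadX, hdot, hX] using ih none none trivial
          | some r => exact absurd hrel (by obtain ⟨a, c, n⟩ := r; simp [pvRel])
        | some sv =>
          obtain ⟨ov, n⟩ := sv
          cases op with
          | none => exact absurd hrel (by simp [pvRel])
          | some r =>
            obtain ⟨a, c, n'⟩ := r
            obtain ⟨rfl, hiff⟩ := hrel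
            have htails := ih none none trivial
            by_cases hov : ov = false
            · have ha : pvAddr a = a := hiff.1 hov
              simpa [pvAcont, pvBcont, pvBadX, hdot, hX, hov, ha] using htails
            · have hov' : ov = true := by cases ov <;> simp_all
              have ha : pvAddr a ≠ a := fun hc => absurd (hiff.2 hc) (by simp [hov'])
              have hfm : pvFmt (pvAddr a) n c ≠ pvFmt a n c := fun hc => ha ((pvFmt_inj _ _ _ _).1 hc)
              simp [pvAcont, pvBcont, pvBadX, hX, hov', hfm]
      · -- a real object code
        have hfresh : pvRel (some (pvAddrOverflow loc, code.toList.length / 2))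
            (some (pvAddr loc.toList, '^' :: code.toList, code.toList.length / 2)) :=
          ⟨rfl, ⟨fun hb => (pvAddr_idem_iff loc).2 hb, fun he => (pvAddr_idem_iff loc).1 he⟩⟩
        cases st with
        | none =>
          cases op with
          | none =>
            simpa [pvAcont, pvBcont, pvBadX, hdot, hX] using ih _ _ hfresh
          | some r => exact absurd hrel (by obtain ⟨a, c, n⟩ := r; simp [pvRel])
        | some sv =>
          obtain ⟨ov, n⟩ := sv
          cases op with
          | none => exact absurd hrel (by simp [pvRel])
          | some r =>
            obtain ⟨a, c, n'⟩ := r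
            obtain ⟨rfl, hiff⟩ := hrel
            by_cases hn : n = 0
            · subst hn
              simpa [pvAcont, pvBcont, pvBadX, hdot, hX] using ih _ _ hfresh
            · by_cases h30 : n + code.length / 2 ≤ 30
              · simpa [pvAcont, pvBcont, pvBadX, hdot, hX, hn, h30] using
                  ih (some (ov, n + code.toList.length / 2))
                    (some (a, c ++ '^' :: code.toList, n + code.toList.length / 2)) ⟨rfl, hiff⟩
              · simpa [pvAcont, pvBcont, pvBadX, hdot, hX, hn, h30] using ih _ _ hfresh

-- both ports expressed through the shared reference loops over the mapped entries
theorem pvPorts_eq_conts (L OC : List String) :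
    T_records L OC = pvAcont none (pvMapped L OC)
      ∧ T_records_alt L OC = pvBcont none (pvMapped L OC) := by
  have hd := pvDict_eq L OC 0 PySem.Dict.empty
  simp only [Nat.cast_zero, List.drop_zero] at hd
  set m : PySem.Dict String String :=
    (L.zip OC).foldl (fun d p => d.insert p.1 p.2) PySem.Dict.empty with hm
  have hTA : T_records L OC
      = (match m.items.foldl pvStepA ([], [], 0, []) with
         | (out, codes, n, addr) => if codes ≠ [] then out ++ [pvFmt addr n codes] else out) :=
    congrArg (fun m : PySem.Dict String String =>
      match m.items.foldl pvStepA ([], [], 0, []) with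
      | (out, codes, n, addr) => if codes ≠ [] then out ++ [pvFmt addr n codes] else out) hd
  have hA := pvA_eq_Acont m.items [] none [] (by simp)
  have hB := pvB_eq_Bcont m.items [] [] [] none rfl (fun _ => rfl)
  simp only [pvStA] at hA
  simp only [List.map_nil, List.nil_append, List.foldl_nil] at hA hB
  have hmap : pvMapped L OC = m.items := pvMapped_eq_items L OC
  constructor
  · rw [hTA, hmap]
    rcases hvA : List.foldl pvStepA ([], [], 0, []) m.items with ⟨o1, c1, n1, a1⟩
    rw [hvA] at hA
    simp only at hA
    simpa using hA
  · show (match m.items.foldl pvStepR ([], []) with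
          | (runs, cur) => (runs ++ [cur]).foldl (fun out r => out ++ pvRunOut r) []) = _
    rw [hmap]
    rcases hvB : List.foldl pvStepR ([], []) m.items with ⟨runs1, cur1⟩
    rw [hvB] at hB
    simpa using hB

-- ===== VERDICT (by name: the statement is the Claim_ definition above) =====
theorem T_records_spec : Claim_unchanged_T_records := by
  intro L OC _ hnd
  obtain ⟨hA, hB⟩ := pvPorts_eq_conts L OC
  rw [hA, hB]
  exact (pvAcont_eq_iff_not_bad (pvMapped L OC) none none trivial).2
    (by simpa [D_T_records] using hnd)

theorem T_records_changed : Claim_changed_T_records := by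
  unfold Claim_changed_T_records; decide

theorem T_records_tight : Claim_exact_T_records := by
  intro L OC _ hd
  obtain ⟨hA, hB⟩ := pvPorts_eq_conts L OC
  rw [hA, hB]
  intro he
  have hf := (pvAcont_eq_iff_not_bad (pvMapped L OC) none none trivial).1 he
  rw [D_T_records] at hd
  simp [hf] at hd
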